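-- pv_equiv track=rewrite | github.com/paiml/depyler | examples/hard_final_sec_substitution.py | is_valid_permutation
-- ===== SOURCE A (Python) =====
-- def is_valid_permutation(perm: list[int]) -> int:
--     """Check if list is a valid permutation of 0-25."""
--     if len(perm) != 26:
--         return 0
--     seen: list[int] = []
--     j: int = 0
--     while j < 26:
--         seen.append(0)
--         j = j + 1
--     i: int = 0
--     while i < 26:
--         pv: int = perm[i]
--         if pv < 0:
--             return 0
--         if pv > 25:
--             return 0
--         old: int = seen[pv]
--         if old == 1:
--             return 0
--         seen[pv] = 1
--         i = i + 1
--     return 1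
-- ===== SOURCE B (Python) =====
-- def is_valid_permutation(perm: list[int]) -> int:
--     """Check if list is a valid permutation of 0-25."""
--     if len(perm) != 26:
--         return 0
--     return 1 if sorted(perm) == list(range(26)) else 0
-- ===== Notes on version B (the rewrite author's own statement) =====
-- stated objective: simpler
-- what changed: Replaces the seen-flag array with its per-element scan and early returns by a single sort-and-compare against list(range(26)).
import Mathlib
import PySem

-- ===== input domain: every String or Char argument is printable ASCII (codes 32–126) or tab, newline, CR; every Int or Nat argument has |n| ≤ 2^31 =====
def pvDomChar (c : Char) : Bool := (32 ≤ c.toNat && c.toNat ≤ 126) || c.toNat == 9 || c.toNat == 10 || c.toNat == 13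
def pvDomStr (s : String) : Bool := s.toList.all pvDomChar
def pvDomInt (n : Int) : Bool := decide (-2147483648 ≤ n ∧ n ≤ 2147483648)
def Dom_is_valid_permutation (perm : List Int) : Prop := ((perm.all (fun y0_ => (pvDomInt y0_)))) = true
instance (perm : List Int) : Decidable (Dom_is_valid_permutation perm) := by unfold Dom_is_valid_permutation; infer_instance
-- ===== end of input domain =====

-- B replaces A's seen-flag array and single scan by sort-and-compare against range(26) (simpler, not faster).

-- ===== PORT A =====
-- while j < 26: seen.append(0); j = j + 1
def pvMkSeen : Nat → List Int
  | 0 => []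
  | n + 1 => pvMkSeen n ++ [0]

-- while i < 26: pv = perm[i]; … — i ranges over all indices of perm (length 26),
-- so the loop is transliterated as structural recursion over perm's elements.
-- seen[pv] / seen[pv] = 1 use pyGetD/pySetD; the guards 0 ≤ pv ≤ 25 keep them in range.
def pvLoopA (seen : List Int) : List Int → Int
  | [] => 1
  | pv :: rest =>
    if pv < 0 then 0
    else if pv > 25 then 0
    else if PySem.List.pyGetD seen pv 0 = 1 then 0
    else pvLoopA (PySem.List.pySetD seen pv 1) rest

def is_valid_permutation (perm : List Int) : Int :=
  if perm.length ≠ 26 then 0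
  else pvLoopA (pvMkSeen 26) perm

-- ===== PORT B =====
def is_valid_permutation_alt (perm : List Int) : Int :=
  if perm.length ≠ 26 then 0
  else if PySem.List.sorted perm (fun x => x) false = PySem.List.pyRange 0 26 1 then 1 else 0

-- ===== PRECONDITION & SPEC =====
def Spec_is_valid_permutation (perm : List Int) (out : Int) : Prop := out = is_valid_permutation_alt perm
instance (perm : List Int) (out : Int) : Decidable (Spec_is_valid_permutation perm out) := by unfold Spec_is_valid_permutation; infer_instance

-- ===== CLAIM (what is proved, stated in full; the proofs are below) =====
def Claim_equal_is_valid_permutation : Prop := ∀ (perm : List Int), Dom_is_valid_permutation perm → Spec_is_valid_permutation perm (is_valid_permutation perm)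

-- ===== LEMMAS AND PROOFS =====

lemma pvMkSeen_eq (n : Nat) : pvMkSeen n = List.replicate n 0 := by
  induction n with
  | zero => rfl
  | succ k ih => simp [pvMkSeen, ih, List.replicate_succ']

-- A's marking loop returns 1 iff every element is in range, not yet marked, and there is no duplicate.
lemma pvLoopA_eq_one_iff (xs : List Int) : ∀ (seen : List Int), seen.length = 26 →
    (pvLoopA seen xs = 1 ↔
      ((∀ v ∈ xs, 0 ≤ v ∧ v < 26 ∧ PySem.List.pyGetD seen v 0 ≠ 1) ∧ xs.Nodup)) := by
  induction xs with
  | nil => intro seen _; simp [pvLoopA]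
  | cons pv rest ih =>
    intro seen hlen
    by_cases h1 : pv < 0
    · simp only [pvLoopA, if_pos h1]
      constructor
      · intro h; exact absurd h (by norm_num)
      · rintro ⟨h, _⟩
        have := (h pv (by simp)).1; omega
    · by_cases h2 : pv > 25
      · simp only [pvLoopA, if_neg h1, if_pos h2]
        constructor
        · intro h; exact absurd h (by norm_num)
        · rintro ⟨h, _⟩
          have := (h pv (by simp)).2.1; omega
      · by_cases h3 : PySem.List.pyGetD seen pv 0 = 1
        · simp only [pvLoopA, if_neg h1, if_neg h2, if_pos h3]
          constructor
          · intro h; exact absurd h (by norm_num)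
          · rintro ⟨h, _⟩
            exact absurd h3 (h pv (by simp)).2.2
        · simp only [pvLoopA, if_neg h1, if_neg h2, if_neg h3]
          have hset : PySem.List.pySetD seen pv 1 = seen.set pv.toNat 1 :=
            PySem.List.pySetD_of_nonneg seen 1 (by omega)
          have hlen' : (PySem.List.pySetD seen pv 1).length = 26 := by
            rw [hset]; simp [hlen]
          have hget : ∀ v : Int, 0 ≤ v → v < 26 →
              PySem.List.pyGetD (PySem.List.pySetD seen pv 1) v 0 =
                if v = pv then 1 else PySem.List.pyGetD seen v 0 := by
            intro v hv0 hv26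
            rw [hset, PySem.List.pyGetD_of_nonneg _ _ hv0,
                PySem.List.pyGetD_of_nonneg seen 0 hv0]
            by_cases hvp : v = pv
            · subst hvp
              simp [List.getD_eq_getElem?_getD,
                    (by omega : v.toNat < seen.length)]
            · rw [if_neg hvp]
              simp [List.getD_eq_getElem?_getD,
                    List.getElem?_set_ne (by omega : pv.toNat ≠ v.toNat)]
          rw [ih _ hlen']
          constructor
          · rintro ⟨h, hnd⟩
            refine ⟨?_, ?_⟩
            · intro v hv
              rcases List.mem_cons.mp hv with rfl | hv'
              · exact ⟨by omega, by omega, h3⟩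
              · obtain ⟨a, b, c⟩ := h v hv'
                refine ⟨a, b, ?_⟩
                rw [hget v a b] at c
                by_cases hvp : v = pv
                · rw [if_pos hvp] at c; exact absurd rfl c
                · rwa [if_neg hvp] at c
            · refine List.nodup_cons.mpr ⟨?_, hnd⟩
              intro hmem
              obtain ⟨a, b, c⟩ := h pv hmem
              rw [hget pv a b, if_pos rfl] at c
              exact c rfl
          · rintro ⟨h, hnd⟩
            have hnd' := List.nodup_cons.mp hnd
            refine ⟨?_, hnd'.2⟩
            intro v hv
            obtain ⟨a, b, c⟩ := h v (List.mem_cons_of_mem _ hv)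
            refine ⟨a, b, ?_⟩
            rw [hget v a b]
            have hvp : v ≠ pv := fun he => hnd'.1 (he ▸ hv)
            rw [if_neg hvp]; exact c

lemma pvLoopA_zero_or_one : ∀ (seen xs : List Int), pvLoopA seen xs = 0 ∨ pvLoopA seen xs = 1 := by
  intro seen xs
  induction xs generalizing seen with
  | nil => right; rfl
  | cons pv rest ih =>
    simp only [pvLoopA]
    split_ifs <;> first | (left; rfl) | exact ih _

lemma pvSeen0_unmarked (v : Int) (hv0 : 0 ≤ v) (hv : v < 26) :
    PySem.List.pyGetD (pvMkSeen 26) v 0 ≠ 1 := by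
  rw [pvMkSeen_eq, PySem.List.pyGetD_of_nonneg _ _ hv0]
  rw [List.getD_eq_getElem?_getD, List.getElem?_replicate]
  simp [(by omega : v.toNat < 26)]

-- the bridge: in-range & nodup (A's 1-condition) ↔ sorted = range(26) (B's 1-condition)
lemma pvBridge (perm : List Int) (hlen : perm.length = 26) :
    ((∀ v ∈ perm, 0 ≤ v ∧ v < 26) ∧ perm.Nodup) ↔
      PySem.List.sorted perm (fun x => x) false = PySem.List.pyRange 0 26 1 := by
  constructor
  · rintro ⟨hrange, hnd⟩
    have hsub : perm ⊆ PySem.List.pyRange 0 26 1 := by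
      intro v hv
      rw [PySem.List.mem_pyRange_one]
      exact ⟨(hrange v hv).1, (hrange v hv).2⟩
    have hsp : (perm).Subperm (PySem.List.pyRange 0 26 1) := hnd.subperm hsub
    have hlenr : (PySem.List.pyRange 0 26 1).length = 26 := by
      rw [PySem.List.length_pyRange_one]; decide
    have hperm : perm.Perm (PySem.List.pyRange 0 26 1) :=
      hsp.perm_of_length_le (by omega)
    exact PySem.List.sorted_eq_of_perm_of_pairwise_lt perm (PySem.List.pyRange 0 26 1) (fun x => x) hperm.symm
      (PySem.List.pairwise_lt_pyRange_one 0 26)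
  · intro hs
    have hperm : (PySem.List.sorted perm (fun x => x) false).Perm perm :=
      PySem.List.sorted_perm perm (fun x => x) false
    rw [hs] at hperm
    constructor
    · intro v hv
      have : v ∈ PySem.List.pyRange 0 26 1 := hperm.mem_iff.mpr hv
      rw [PySem.List.mem_pyRange_one] at this
      exact ⟨this.1, this.2⟩
    · exact hperm.nodup_iff.mp (PySem.List.nodup_pyRange_one 0 26)

-- ===== VERDICT (by name: the statement is the Claim_ definition above) =====
theorem is_valid_permutation_spec : Claim_equal_is_valid_permutation := by
  intro perm _
  unfold Spec_is_valid_permutation is_valid_permutation is_valid_permutation_alt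
  by_cases hlen : perm.length = 26
  · simp only [hlen, ne_eq, not_true_eq_false, if_false]
    have hiff := pvLoopA_eq_one_iff perm (pvMkSeen 26) (by rw [pvMkSeen_eq]; simp)
    by_cases hc : PySem.List.sorted perm (fun x => x) false = PySem.List.pyRange 0 26 1
    · rw [if_pos hc]
      have := (pvBridge perm hlen).mpr hc
      exact hiff.mpr ⟨fun v hv => ⟨(this.1 v hv).1, (this.1 v hv).2,
        pvSeen0_unmarked v (this.1 v hv).1 (this.1 v hv).2⟩, this.2⟩
    · rw [if_neg hc]
      rcases pvLoopA_zero_or_one (pvMkSeen 26) perm with h0 | h1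
      · exact h0
      · exfalso
        obtain ⟨h, hnd⟩ := hiff.mp h1
        exact hc ((pvBridge perm hlen).mp ⟨fun v hv => ⟨(h v hv).1, (h v hv).2.1⟩, hnd⟩)
  · simp [hlen]
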